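-- pv_equiv track=rewrite | github.com/rtaiello/nusmv-goal-controller | src/my_lib/my_controller.py | check_exist
-- ===== SOURCE A (Python) =====
-- def check_exist(path_list: list, tmp: set):
--     result = []
--     visited = False
--     i = 0
--     while i < len(path_list) and not visited:
--         visited = path_list[i] in tmp
--         if not visited:
--             result.append(path_list[i])
--             i = i + 1
--         else:
--             result.append(path_list[i])
--             i = len(path_list)
--     return result
-- ===== SOURCE B (Python) =====
-- def check_exist(path_list: list, tmp: set):
--     for i, x in enumerate(path_list):
--         if x in tmp:
--             return path_list[:i + 1]
--     return path_list[:]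
-- ===== Notes on version B (the rewrite author's own statement) =====
-- stated objective: simpler
-- what changed: Replaces the index/flag while-loop with incremental appends by a find-first-match scan (enumerate) followed by one bulk slice path_list[:i+1], copying the whole list when nothing matches.
import Mathlib
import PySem

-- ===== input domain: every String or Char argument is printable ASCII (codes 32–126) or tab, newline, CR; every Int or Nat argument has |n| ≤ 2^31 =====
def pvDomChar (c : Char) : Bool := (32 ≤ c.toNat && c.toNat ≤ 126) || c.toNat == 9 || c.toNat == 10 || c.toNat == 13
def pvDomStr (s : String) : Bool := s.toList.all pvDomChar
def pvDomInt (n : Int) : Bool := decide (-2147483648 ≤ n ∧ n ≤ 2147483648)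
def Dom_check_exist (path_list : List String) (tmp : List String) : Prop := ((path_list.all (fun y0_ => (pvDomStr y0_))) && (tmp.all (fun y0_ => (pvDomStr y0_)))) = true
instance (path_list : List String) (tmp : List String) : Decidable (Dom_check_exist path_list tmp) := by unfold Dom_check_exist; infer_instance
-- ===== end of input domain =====

-- B replaces A's index/flag while-loop with a find-first-match scan plus one bulk slice (simpler decomposition).


-- ===== PORT A =====
-- while i < len(path_list) and not visited: … (visited exits the loop by setting i = len)
def checkLoopA (path_list : List String) (tmp : List String) (result : List String) (i : Nat) : List String :=
  if h : i < path_list.length then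
    -- visited := path_list[i] in tmp
    if path_list[i] ∈ tmp then
      result ++ [path_list[i]]          -- i := len(path_list): loop ends
    else
      checkLoopA path_list tmp (result ++ [path_list[i]]) (i + 1)
  else result
termination_by path_list.length - i

def check_exist (path_list : List String) (tmp : List String) : List String :=
  checkLoopA path_list tmp [] 0

-- ===== PORT B =====
-- next((i for i, x in enumerate(path_list) if x in tmp), None)
def findHit (pairs : List (Int × String)) (tmp : List String) : Option Int :=
  match pairs with
  | [] => none
  | (i, x) :: rest => if x ∈ tmp then some i else findHit rest tmp

def check_exist_alt (path_list : List String) (tmp : List String) : List String :=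
  match findHit (PySem.List.enumerate path_list 0) tmp with
  | some i => PySem.List.slice path_list none (some (i + 1))   -- path_list[:i+1]
  | none => PySem.List.slice path_list none none               -- path_list[:]

-- ===== PRECONDITION & SPEC =====
def Spec_check_exist (path_list : List String) (tmp : List String) (out : List String) : Prop := out = check_exist_alt path_list tmp
instance (path_list : List String) (tmp : List String) (out : List String) : Decidable (Spec_check_exist path_list tmp out) := by unfold Spec_check_exist; infer_instance

-- ===== CLAIM (what is proved, stated in full; the proofs are below) =====
def Claim_equal_check_exist : Prop := ∀ (path_list : List String) (tmp : List String), Dom_check_exist path_list tmp → Spec_check_exist path_list tmp (check_exist path_list tmp)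

-- ===== LEMMAS AND PROOFS =====

-- canonical value: prefix of path_list up to and including the first element in tmp
def goPrefix (pl : List String) (tmp : List String) : List String :=
  match pl with
  | [] => []
  | x :: xs => if x ∈ tmp then [x] else x :: goPrefix xs tmp

-- first-hit index as a structural Nat recursion
def findIdxNat (pl : List String) (tmp : List String) : Option Nat :=
  match pl with
  | [] => none
  | x :: xs => if x ∈ tmp then some 0 else (findIdxNat xs tmp).map (· + 1)

lemma findHit_enumerate (pl tmp : List String) : ∀ (s : Int),
    findHit (PySem.List.enumerate pl s) tmp = (findIdxNat pl tmp).map (fun k => s + (k : Int)) := by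
  induction pl with
  | nil => intro s; simp [findHit, findIdxNat, PySem.List.enumerate_nil]
  | cons x xs ih =>
    intro s
    simp only [PySem.List.enumerate_cons, findHit, findIdxNat]
    by_cases hx : x ∈ tmp
    · simp [hx]
    · simp only [hx, if_false, ih (s + 1)]
      cases findIdxNat xs tmp with
      | none => simp
      | some k => simp [Option.map]; ring

lemma take_findIdx_eq_goPrefix (pl tmp : List String) :
    (match findIdxNat pl tmp with
     | some k => pl.take (k + 1)
     | none => pl) = goPrefix pl tmp := by
  induction pl with
  | nil => simp [findIdxNat, goPrefix]
  | cons x xs ih =>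
    simp only [findIdxNat, goPrefix]
    by_cases hx : x ∈ tmp
    · simp [hx]
    · simp only [hx, if_false]
      cases h : findIdxNat xs tmp with
      | none => simp [h] at ih ⊢; exact ih
      | some k => simp [h] at ih ⊢; exact ih

lemma alt_eq_goPrefix (pl tmp : List String) : check_exist_alt pl tmp = goPrefix pl tmp := by
  unfold check_exist_alt
  rw [findHit_enumerate pl tmp 0]
  rw [← take_findIdx_eq_goPrefix pl tmp]
  cases h : findIdxNat pl tmp with
  | none => simp [PySem.List.slice_none_none]
  | some k =>
    have h1 : (0 : Int) + (k : Int) + 1 = ((k + 1 : Nat) : Int) := by push_cast; ring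
    show PySem.List.slice pl none (some ((0 : Int) + (k : Int) + 1)) = pl.take (k + 1)
    rw [h1, PySem.List.slice_to_natCast]

lemma loopA_eq (pl tmp : List String) : ∀ (n i : Nat) (res : List String), pl.length - i ≤ n →
    checkLoopA pl tmp res i = res ++ goPrefix (pl.drop i) tmp := by
  intro n
  induction n with
  | zero =>
    intro i res hn
    have h : ¬ i < pl.length := by omega
    unfold checkLoopA
    rw [dif_neg h, List.drop_of_length_le (by omega)]
    simp [goPrefix]
  | succ n ih =>
    intro i res hn
    unfold checkLoopA
    by_cases h : i < pl.length
    · have hdrop : pl.drop i = pl[i] :: pl.drop (i + 1) := List.drop_eq_getElem_cons h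
      rw [dif_pos h, hdrop]
      by_cases hx : pl[i] ∈ tmp
      · rw [if_pos hx]
        simp only [goPrefix, if_pos hx]
      · rw [if_neg hx, ih (i + 1) (res ++ [pl[i]]) (by omega)]
        simp only [goPrefix, if_neg hx]
        simp
    · rw [dif_neg h, List.drop_of_length_le (by omega)]
      simp [goPrefix]

-- ===== VERDICT (by name: the statement is the Claim_ definition above) =====
theorem check_exist_spec : Claim_equal_check_exist := by
  intro pl tmp _
  unfold Spec_check_exist check_exist
  rw [loopA_eq pl tmp pl.length 0 [] (by omega), alt_eq_goPrefix]
  simp
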